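-- pv_equiv track=rewrite | github.com/lindenmg/Writing-Prompts-Dataset-Creator | src/utils/data_processing.py | idx_lookup_from_list
-- ===== SOURCE A (Python) =====
-- import collections
--
-- def idx_lookup_from_list(list_, default_dict=False, default_idx=0):
--     """
--     Creates a dict with the list elements as key and their index as value
--
--     Parameters
--     ----------
--     list_: list
--     default_dict:bool
--         If it shall construct a dict which returns 0
--         if the key does not exist in the dictionary
--     default_idx: int
--         Default index of the ``default_dict``
--
--     Returns
--     -------
--     dict or collections.defaultdict
--
--     Raises
--     ------
--     Warning, when the values in list_ are not unique
--     """
--     if default_dict: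
--         look_up = collections.defaultdict(lambda: default_idx)
--     else:
--         look_up = {}
--
--     len_list = len(list_)
--     len_unique = len(list(set(list_)))
--     if len_list != len_unique:
--         raise Warning("The values in list_ are not unique!")
--
--     for i, w in enumerate(list_):
--         look_up[w] = i
--     return look_up
-- ===== SOURCE B (Python) =====
-- import collections
--
-- def idx_lookup_from_list(list_, default_dict=False, default_idx=0):
--     """
--     Creates a dict with the list elements as key and their index as value.
--     Single fused pass: uniqueness is verified inline while inserting (abort
--     at the first repeated element), instead of a separate set()-based
--     pre-check followed by a build loop.
--     """
--     if default_dict: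
--         look_up = collections.defaultdict(lambda: default_idx)
--     else:
--         look_up = {}
--     for i, w in enumerate(list_):
--         if w in look_up:
--             raise Warning("The values in list_ are not unique!")
--         look_up[w] = i
--     return look_up
-- ===== Notes on version B (the rewrite author's own statement) =====
-- stated objective: simpler
-- what changed: B fuses A's two stages (a set()-based uniqueness pre-check over the whole list, then a separate enumerate-insert loop) into one single pass that checks membership in the dict being built and raises at the first repeated element, so no auxiliary set is built and the list is traversed once.
import Mathlib
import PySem

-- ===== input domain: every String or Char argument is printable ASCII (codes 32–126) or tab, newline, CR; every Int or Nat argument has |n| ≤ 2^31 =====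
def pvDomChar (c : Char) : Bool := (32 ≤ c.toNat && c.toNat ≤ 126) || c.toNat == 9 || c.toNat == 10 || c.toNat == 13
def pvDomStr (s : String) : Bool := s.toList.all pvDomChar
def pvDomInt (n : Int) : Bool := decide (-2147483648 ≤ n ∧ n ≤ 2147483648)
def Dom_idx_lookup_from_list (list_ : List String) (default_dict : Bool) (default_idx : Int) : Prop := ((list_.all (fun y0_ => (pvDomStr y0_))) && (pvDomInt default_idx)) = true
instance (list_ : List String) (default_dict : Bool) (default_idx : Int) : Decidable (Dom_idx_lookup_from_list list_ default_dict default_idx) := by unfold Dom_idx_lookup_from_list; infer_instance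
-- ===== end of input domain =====

-- B fuses A's two stages (set()-based uniqueness pre-check, then a build loop) into one
-- single pass that checks membership in the dict being built and aborts at the first
-- repeated element (objective: simpler; no auxiliary set).

-- ===== PORT A =====
-- A: optional defaultdict (same key→index items as a plain dict; only the lookup default
-- differs, which the returned items do not observe), uniqueness check via len(set(list_)),
-- then `for i, w in enumerate(list_): look_up[w] = i`.
def idx_lookup_from_list (list_ : List String) (default_dict : Bool) (default_idx : Int) : List (String × Int) :=
  let look_up : PySem.Dict String Int := PySem.Dict.empty  -- both branches start from an empty mapping
  let len_list : Int := list_.length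
  let len_unique : Int := PySem.Set.len (PySem.Set.ofList list_)
  if len_list ≠ len_unique then []  -- `raise Warning(...)`: excluded by Pre_
  else ((PySem.List.enumerate list_).foldl (fun d p => d.insert p.2 p.1) look_up).items

-- ===== PORT B =====
-- B's loop: `for i, w in enumerate(list_): if w in look_up: raise Warning(...); look_up[w] = i`;
-- `none` marks the raise (excluded by Pre_).
def pvFillB (d : PySem.Dict String Int) : List (Int × String) → Option (PySem.Dict String Int)
  | [] => some d
  | p :: rest => if d.contains p.2 then none else pvFillB (d.insert p.2 p.1) rest

def idx_lookup_from_list_alt (list_ : List String) (default_dict : Bool) (default_idx : Int) : List (String × Int) :=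
  match pvFillB PySem.Dict.empty (PySem.List.enumerate list_) with
  | none => []  -- `raise Warning(...)`: excluded by Pre_
  | some d => d.items

-- ===== PRECONDITION & SPEC =====
-- Pre_ excludes exactly the lists with duplicate elements, on which both A and B raise Warning.
def Pre_idx_lookup_from_list (list_ : List String) (default_dict : Bool) (default_idx : Int) : Prop := list_.Nodup
instance (list_ : List String) (default_dict : Bool) (default_idx : Int) : Decidable (Pre_idx_lookup_from_list list_ default_dict default_idx) := by unfold Pre_idx_lookup_from_list; infer_instance

def pvWitness_idx_lookup_from_list : List String × Bool × Int := (["a", "b", " 7"], true, 2)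

def Spec_idx_lookup_from_list (list_ : List String) (default_dict : Bool) (default_idx : Int) (out : List (String × Int)) : Prop := out = idx_lookup_from_list_alt list_ default_dict default_idx
instance (list_ : List String) (default_dict : Bool) (default_idx : Int) (out : List (String × Int)) : Decidable (Spec_idx_lookup_from_list list_ default_dict default_idx out) := by unfold Spec_idx_lookup_from_list; infer_instance

-- ===== CLAIM (what is proved, stated in full; the proofs are below) =====
def Claim_equal_idx_lookup_from_list : Prop := ∀ (list_ : List String) (default_dict : Bool) (default_idx : Int), Dom_idx_lookup_from_list list_ default_dict default_idx → Pre_idx_lookup_from_list list_ default_dict default_idx → Spec_idx_lookup_from_list list_ default_dict default_idx (idx_lookup_from_list list_ default_dict default_idx)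

-- ===== LEMMAS AND PROOFS =====

-- folding Set.add over a duplicate-free list disjoint from the accumulator appends it
theorem pv_foldl_add (xs : List String) (acc : List String) (h1 : xs.Nodup)
    (h2 : ∀ x ∈ xs, x ∉ acc) : xs.foldl PySem.Set.add acc = acc ++ xs := by
  induction xs generalizing acc with
  | nil => simp
  | cons x xs ih =>
    simp only [List.foldl_cons]
    rw [ih _ (List.Nodup.of_cons h1)]
    · simp [PySem.Set.add, PySem.Set.contains, h2 x (by simp)]
    · intro y hy
      simp [PySem.Set.add, PySem.Set.contains, h2 x (by simp)]
      constructor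
      · exact h2 y (by simp [hy])
      · rintro rfl; exact (List.nodup_cons.mp h1).1 hy

-- set(xs) on a duplicate-free list is the list itself
theorem pv_ofList_of_nodup (xs : List String) (h : xs.Nodup) :
    PySem.Set.ofList xs = xs := by
  rw [PySem.Set.ofList_eq_foldl, pv_foldl_add xs [] h (by simp)]; simp

-- on fresh distinct keys B's check-and-insert loop never raises and computes A's insert fold
theorem pv_fillB_eq (l : List (Int × String)) (d : PySem.Dict String Int)
    (hnd : (l.map Prod.snd).Nodup) (hfresh : ∀ p ∈ l, d.contains p.2 = false) :
    pvFillB d l = some (l.foldl (fun d p => d.insert p.2 p.1) d) := by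
  induction l generalizing d with
  | nil => rfl
  | cons p rest ih =>
    have hfresh' : ∀ q ∈ rest, (d.insert p.2 p.1).contains q.2 = false := by
      intro q hq
      rw [PySem.Dict.contains_insert]
      have h0 : p.2 ∉ rest.map Prod.snd := by
        simp only [List.map_cons, List.nodup_cons] at hnd; exact hnd.1
      have hne : q.2 ≠ p.2 := fun h => h0 (h ▸ List.mem_map_of_mem hq)
      simp [hfresh q (by simp [hq]), hne]
    simp [pvFillB, hfresh p (by simp), ih _ (by simpa using hnd.of_cons) hfresh']

-- ===== VERDICT (by name: the statement is the Claim_ definition above) =====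
theorem idx_lookup_from_list_spec : Claim_equal_idx_lookup_from_list := by
  intro xs dd di _ hpre
  unfold Spec_idx_lookup_from_list idx_lookup_from_list idx_lookup_from_list_alt
  have hset : PySem.Set.len (PySem.Set.ofList xs) = (xs.length : Int) := by
    rw [pv_ofList_of_nodup xs hpre]; rfl
  have hfill := pv_fillB_eq (PySem.List.enumerate xs) PySem.Dict.empty
    (by rw [PySem.List.map_snd_enumerate]; exact hpre)
    (by intro p _; simp)
  simp only [hset, ne_eq, not_true_eq_false, if_false, hfill]
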